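-- pv_equiv track=rewrite | github.com/Bersin07/latest-scraping-summary | app2_flaskisfinal_app3_.py | format_llm_response
-- ===== SOURCE A (Python) =====
-- def format_llm_response(response_text: str) -> str:
--     if not response_text or "no context" in response_text.lower():
--         return "<p>No response available.</p>"
--     lines = [line.strip() for line in response_text.split('\n') if line.strip()]
--     if not lines:
--         return f"<p>{response_text}</p>"
--     formatted_html = []
--     in_list = False
--     for line in lines:
--         if line.startswith(('- ', '* ')):
--             if not in_list:
--                 formatted_html.append("<ul>")
--                 in_list = True
--             formatted_html.append(f"<li>{line[2:].strip()}</li>")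
--         else:
--             if in_list:
--                 formatted_html.append("</ul>")
--                 in_list = False
--             formatted_html.append(f"<p>{line}</p>")
--     if in_list:
--         formatted_html.append("</ul>")
--     return ''.join(formatted_html)
-- ===== SOURCE B (Python) =====
-- def format_llm_response(response_text: str) -> str:
--     if not response_text or "no context" in response_text.lower():
--         return "<p>No response available.</p>"
--     lines = [line.strip() for line in response_text.split('\n') if line.strip()]
--     if not lines:
--         return f"<p>{response_text}</p>"
--
--     def bullet(l):
--         return l.startswith('- ') or l.startswith('* ')
--
--     parts = []
--     i, n = 0, len(lines)
--     while i < n:  # group consecutive runs with the same bullet-ness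
--         k = bullet(lines[i])
--         j = i
--         while j < n and bullet(lines[j]) == k:
--             j += 1
--         if k:
--             parts.append("<ul>")
--             parts.extend("<li>" + l[2:].strip() + "</li>" for l in lines[i:j])
--             parts.append("</ul>")
--         else:
--             parts.extend("<p>" + l + "</p>" for l in lines[i:j])
--         i = j
--     return ''.join(parts)
-- ===== Notes on version B (the rewrite author's own statement) =====
-- stated objective: alternative
-- what changed: Replaces A's stateful in_list flag loop by explicit grouping of the lines into maximal consecutive runs of bullet/non-bullet lines, emitting <ul>...</ul> per bullet run and <p> lines per non-bullet run.
import Mathlib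
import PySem

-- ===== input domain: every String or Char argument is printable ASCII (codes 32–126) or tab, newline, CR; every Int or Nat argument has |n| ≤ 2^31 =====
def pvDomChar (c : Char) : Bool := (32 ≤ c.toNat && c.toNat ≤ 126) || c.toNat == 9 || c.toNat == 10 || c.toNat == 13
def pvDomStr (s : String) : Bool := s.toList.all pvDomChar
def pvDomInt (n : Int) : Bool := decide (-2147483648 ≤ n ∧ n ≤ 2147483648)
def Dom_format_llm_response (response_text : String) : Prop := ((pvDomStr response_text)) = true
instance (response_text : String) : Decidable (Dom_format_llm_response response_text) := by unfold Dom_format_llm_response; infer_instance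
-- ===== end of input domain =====

-- B replaces A's in_list flag by explicit grouping of consecutive runs of bullet/non-bullet lines (alternative decomposition, same cost).

-- shared by both ports: line.startswith(('- ', '* '))
def pvBullet (l : String) : Bool :=
  PySem.Str.startswith l "- " || PySem.Str.startswith l "* "

-- "<li>" + line[2:].strip() + "</li>"
def pvLi (l : String) : String :=
  PySem.Str.join "" ["<li>", PySem.Str.strip (PySem.Str.slice l (some 2) none), "</li>"]

-- "<p>" + line + "</p>"
def pvP (l : String) : String :=
  PySem.Str.join "" ["<p>", l, "</p>"]

-- ===== PORT A =====
-- A's for-loop over lines with the (formatted_html, in_list) state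
def pvLoopA : List String → List String → Bool → List String × Bool
  | [], acc, inList => (acc, inList)
  | l :: rest, acc, inList =>
    if pvBullet l then
      let acc := if inList then acc else acc ++ ["<ul>"]
      pvLoopA rest (acc ++ [pvLi l]) true
    else
      let acc := if inList then acc ++ ["</ul>"] else acc
      pvLoopA rest (acc ++ [pvP l]) false

def format_llm_response (response_text : String) : String :=
  if response_text = "" || PySem.Str.isIn "no context" (PySem.Str.lower response_text) then
    "<p>No response available.</p>"
  else
    -- sep is the literal "\n" ≠ "", so split? is always `some`; getD only discharges the Option
    let lines := (((PySem.Str.split? response_text "\n").getD []).filter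
        (fun line => PySem.Str.strip line ≠ "")).map PySem.Str.strip
    if lines = [] then PySem.Str.join "" ["<p>", response_text, "</p>"]
    else
      let r := pvLoopA lines [] false
      PySem.Str.join "" (if r.2 then r.1 ++ ["</ul>"] else r.1)

-- ===== PORT B =====
-- B's run grouping: maximal consecutive runs of lines with the same bullet-ness
def pvRunsB : List String → List (Bool × List String)
  | [] => []
  | l :: ls =>
    (pvBullet l, l :: ls.takeWhile (fun x => pvBullet x == pvBullet l)) ::
      pvRunsB (ls.dropWhile (fun x => pvBullet x == pvBullet l))
  termination_by ls => ls.length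
  decreasing_by
    simpa using Nat.lt_succ_of_le (List.length_dropWhile_le _ _)

def pvEmitB (g : Bool × List String) : List String :=
  if g.1 then "<ul>" :: g.2.map pvLi ++ ["</ul>"]
  else g.2.map pvP

def format_llm_response_alt (response_text : String) : String :=
  if response_text = "" || PySem.Str.isIn "no context" (PySem.Str.lower response_text) then
    "<p>No response available.</p>"
  else
    -- sep is the literal "\n" ≠ "", so split? is always `some`; getD only discharges the Option
    let lines := (((PySem.Str.split? response_text "\n").getD []).filter
        (fun line => PySem.Str.strip line ≠ "")).map PySem.Str.strip
    if lines = [] then PySem.Str.join "" ["<p>", response_text, "</p>"]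
    else PySem.Str.join "" ((pvRunsB lines).flatMap pvEmitB)

-- ===== PRECONDITION & SPEC =====
def Spec_format_llm_response (response_text : String) (out : String) : Prop := out = format_llm_response_alt response_text
instance (response_text : String) (out : String) : Decidable (Spec_format_llm_response response_text out) := by unfold Spec_format_llm_response; infer_instance

-- ===== CLAIM (what is proved, stated in full; the proofs are below) =====
def Claim_equal_format_llm_response : Prop := ∀ (response_text : String), Dom_format_llm_response response_text → Spec_format_llm_response response_text (format_llm_response response_text)

-- ===== LEMMAS AND PROOFS =====

-- the accumulator of A's loop is a prefix that can be factored out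
theorem pvLoopA_append (ls : List String) (acc : List String) (b : Bool) :
    pvLoopA ls acc b = (acc ++ (pvLoopA ls [] b).1, (pvLoopA ls [] b).2) := by
  induction ls generalizing acc b with
  | nil => simp [pvLoopA]
  | cons l rest ih =>
    by_cases h : pvBullet l = true
    · cases b
      · simp [pvLoopA, h, ih (acc ++ _)]
        rw [ih ["<ul>", pvLi l]]
        simp
      · simp [pvLoopA, h, ih (acc ++ _)]
        rw [ih [pvLi l]]
        simp
    · simp only [Bool.not_eq_true] at h
      cases b
      · simp [pvLoopA, h, ih (acc ++ _)]
        rw [ih [pvP l]]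
        simp
      · simp [pvLoopA, h, ih (acc ++ _)]
        rw [ih ["</ul>", pvP l]]
        simp

-- close off A's loop state (the trailing "</ul>" when still inside a list)
def pvClose (r : List String × Bool) : List String :=
  if r.2 then r.1 ++ ["</ul>"] else r.1

-- a run list starting with a non-bullet line: its emission starts with the <p> run
theorem pvRunsB_flat_nonbullet (rest : List String) :
    (pvRunsB rest).flatMap pvEmitB =
      (rest.takeWhile (fun x => pvBullet x == false)).map pvP ++
        (pvRunsB (rest.dropWhile (fun x => pvBullet x == false))).flatMap pvEmitB := by
  cases rest with
  | nil => simp [pvRunsB]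
  | cons r rs =>
    by_cases h : pvBullet r = true
    · simp [h]
    · simp only [Bool.not_eq_true] at h
      simp [pvRunsB, pvEmitB, h]

-- main invariant: A's closed loop output equals B's run emission
theorem pvMain (ls : List String) :
    pvClose (pvLoopA ls [] false) = (pvRunsB ls).flatMap pvEmitB ∧
    pvClose (pvLoopA ls [] true) =
      (ls.takeWhile (fun x => pvBullet x == true)).map pvLi ++ ["</ul>"] ++
        (pvRunsB (ls.dropWhile (fun x => pvBullet x == true))).flatMap pvEmitB := by
  induction ls with
  | nil => simp [pvLoopA, pvClose, pvRunsB]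
  | cons l rest ih =>
    obtain ⟨ihF, ihT⟩ := ih
    by_cases h : pvBullet l = true
    · constructor
      · simp only [pvLoopA, h, if_true, Bool.false_eq_true, if_false, List.nil_append]
        rw [pvLoopA_append]
        simp only [pvClose] at ihT ⊢
        rcases hb : (pvLoopA rest [] true).2 <;>
          simp_all [pvRunsB, pvEmitB, List.append_assoc]
      · simp only [pvLoopA, h, if_true, List.nil_append]
        rw [pvLoopA_append]
        simp only [pvClose] at ihT ⊢
        rcases hb : (pvLoopA rest [] true).2 <;>
          simp_all [List.append_assoc]
    · simp only [Bool.not_eq_true] at h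
      constructor
      · simp only [pvLoopA, h, Bool.false_eq_true, if_false, List.nil_append]
        rw [pvLoopA_append]
        simp only [pvClose] at ihF ⊢
        rcases hb : (pvLoopA rest [] false).2 <;>
          simp_all [List.append_assoc] <;>
          (rw [pvRunsB_flat_nonbullet rest]; simp [pvRunsB, pvEmitB, h])
      · simp only [pvLoopA, h, Bool.false_eq_true, if_false, if_true, List.nil_append]
        rw [pvLoopA_append]
        simp only [pvClose] at ihF ⊢
        rcases hb : (pvLoopA rest [] false).2 <;>
          simp_all [List.append_assoc] <;>
          (rw [pvRunsB_flat_nonbullet rest]; simp [pvRunsB, pvEmitB, h])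

-- ===== VERDICT (by name: the statement is the Claim_ definition above) =====
theorem format_llm_response_spec : Claim_equal_format_llm_response := by
  intro s _
  unfold Spec_format_llm_response format_llm_response format_llm_response_alt
  split
  · rfl
  · dsimp only
    split
    · rfl
    · have h1 := (pvMain ((((PySem.Str.split? s "\n").getD []).filter
          (fun line => PySem.Str.strip line ≠ "")).map PySem.Str.strip)).1
      unfold pvClose at h1
      rw [h1]
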